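-- pv_equiv track=rewrite | github.com/mkm3/coding-challenges | repeated_string.py | repeatedString2
-- ===== SOURCE A (Python) =====
-- def repeatedString2(s, n):
--
--     total_substring = n // len(s)
--     remaining_substring = n % len(s)
--
--     num_a_in_s = 0
--     num_a_in_remainder_s = 0
--
--
--     for idx, char in enumerate(s):
--         if char == "a":
--             num_a_in_s += 1
--             if idx < remaining_substring:
--                 num_a_in_remainder_s += 1
--
--     return (num_a_in_s * total_substring) + num_a_in_remainder_s
-- ===== SOURCE B (Python) =====
-- def repeatedString2(s, n):
--     # Each occurrence of 'a' at index i of s appears in the first n characters of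
--     # the infinite repetition exactly ceil((n - i) / len(s)) = -((i - n) // len(s)) times.
--     L = len(s)
--     return sum(-((i - n) // L) for i, c in enumerate(s) if c == "a")
-- ===== Notes on version B (the rewrite author's own statement) =====
-- stated objective: alternative
-- what changed: Instead of A's quotient/remainder decomposition with two fused accumulators, B sums a per-occurrence closed form: each 'a' at index i contributes ceil((n-i)/len(s)) = -((i-n)//len(s)) copies, so the answer is one sum of ceiling divisions with no n//len(s), n%len(s), or prefix counting.
import Mathlib
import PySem

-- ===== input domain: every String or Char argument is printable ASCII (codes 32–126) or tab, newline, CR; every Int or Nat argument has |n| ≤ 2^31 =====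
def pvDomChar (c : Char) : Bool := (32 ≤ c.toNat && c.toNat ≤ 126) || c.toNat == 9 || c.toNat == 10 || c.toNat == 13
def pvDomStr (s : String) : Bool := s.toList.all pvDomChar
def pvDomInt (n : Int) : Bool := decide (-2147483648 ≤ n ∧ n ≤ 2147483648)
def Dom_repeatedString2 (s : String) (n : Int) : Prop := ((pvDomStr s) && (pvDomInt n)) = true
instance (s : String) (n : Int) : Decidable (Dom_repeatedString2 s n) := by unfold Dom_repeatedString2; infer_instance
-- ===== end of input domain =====

-- B replaces A's quotient/remainder decomposition (whole-string count times n//len(s) plus a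
-- guarded prefix count) by a single sum of per-occurrence ceiling divisions -((i-n)//len(s));
-- objective: alternative.

-- ===== PORT A =====
def repeatedString2 (s : String) (n : Int) : Int :=
  let total_substring := PySem.Int.floordiv n (PySem.Str.len s)
  let remaining_substring := PySem.Int.mod n (PySem.Str.len s)
  let p := (PySem.List.enumerate s.toList 0).foldl
    (fun (acc : Int × Int) ic =>
      if ic.2 == 'a' then
        (acc.1 + 1, if ic.1 < remaining_substring then acc.2 + 1 else acc.2)
      else acc) (0, 0)
  p.1 * total_substring + p.2

-- ===== PORT B =====
def repeatedString2_alt (s : String) (n : Int) : Int :=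
  let L := PySem.Str.len s
  (((PySem.List.enumerate s.toList 0).filter (fun ic => ic.2 == 'a')).map
    (fun ic => -(PySem.Int.floordiv (ic.1 - n) L))).sum

-- ===== PRECONDITION & SPEC =====
-- Pre_ excludes only the empty string, on which A's 'n // len(s)' raises ZeroDivisionError.
def Pre_repeatedString2 (s : String) (n : Int) : Prop := s.toList ≠ []
instance (s : String) (n : Int) : Decidable (Pre_repeatedString2 s n) := by unfold Pre_repeatedString2; infer_instance
def pvWitness_repeatedString2 : String × Int := ("abca", 10)

def Spec_repeatedString2 (s : String) (n : Int) (out : Int) : Prop := out = repeatedString2_alt s n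
instance (s : String) (n : Int) (out : Int) : Decidable (Spec_repeatedString2 s n out) := by unfold Spec_repeatedString2; infer_instance

-- ===== CLAIM (what is proved, stated in full; the proofs are below) =====
def Claim_equal_repeatedString2 : Prop := ∀ (s : String) (n : Int), Dom_repeatedString2 s n → Pre_repeatedString2 s n → Spec_repeatedString2 s n (repeatedString2 s n)

-- ===== LEMMAS AND PROOFS =====

-- per-occurrence closed form: for 0 ≤ i < L, -((i - n) // L) = n // L + (1 if i < n % L else 0)
theorem per_index (n L i : Int) (hL : 0 < L) (hi0 : 0 ≤ i) (hiL : i < L) :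
    -(PySem.Int.floordiv (i - n) L)
      = PySem.Int.floordiv n L + (if i < PySem.Int.mod n L then 1 else 0) := by
  have hqr := PySem.Int.floordiv_mul_add_mod n L
  have hr0 := PySem.Int.mod_nonneg n hL
  have hrL := PySem.Int.mod_lt n hL
  set q := PySem.Int.floordiv n L with hq
  set r := PySem.Int.mod n L with hr
  by_cases hc : i < r
  · rw [if_pos hc]
    have : PySem.Int.floordiv (i - n) L = -(q + 1) := by
      rw [PySem.Int.floordiv_eq_iff_of_pos hL]
      constructor <;> nlinarith
    omega
  · rw [if_neg hc]
    have : PySem.Int.floordiv (i - n) L = -q := by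
      rw [PySem.Int.floordiv_eq_iff_of_pos hL]
      constructor <;> nlinarith
    omega

-- A's fused loop computes (count of 'a', count of 'a' among indices < r)
theorem loopA (r : Int) (l : List Char) : ∀ (k : Int) (a b : Int), 0 ≤ k →
    (PySem.List.enumerate l k).foldl
      (fun (acc : Int × Int) ic =>
        if ic.2 == 'a' then
          (acc.1 + 1, if ic.1 < r then acc.2 + 1 else acc.2)
        else acc) (a, b)
    = (a + (l.count 'a' : Int), b + ((l.take (r - k).toNat).count 'a' : Int)) := by
  induction l with
  | nil => intro k a b _; simp [PySem.List.enumerate_nil]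
  | cons h t ih =>
      intro k a b hk
      rw [PySem.List.enumerate_cons]
      simp only [List.foldl_cons]
      by_cases hc : h = 'a'
      · subst hc
        simp only [beq_self_eq_true, if_pos]
        by_cases hr : k < r
        · have htake : (r - k).toNat = ((r - (k + 1)).toNat) + 1 := by omega
          rw [if_pos hr, ih (k + 1) (a + 1) (b + 1) (by omega)]
          simp [htake, List.count_cons]
          constructor <;> push_cast <;> ring
        · have h0 : (r - k).toNat = 0 := by omega
          have h1 : (r - (k + 1)).toNat = 0 := by omega
          rw [if_neg hr, ih (k + 1) (a + 1) b (by omega)]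
          simp [h0, h1, List.count_cons]
          push_cast; ring
      · have : (h == 'a') = false := by simpa using hc
        rw [this]
        simp only [Bool.false_eq_true, if_false]
        rw [ih (k + 1) a b (by omega)]
        by_cases hr : k < r
        · have htake : (r - k).toNat = ((r - (k + 1)).toNat) + 1 := by omega
          simp [htake, List.count_cons, hc]
        · have h0 : (r - k).toNat = 0 := by omega
          have h1 : (r - (k + 1)).toNat = 0 := by omega
          simp [h0, h1, List.count_cons, hc]

-- B's per-occurrence sum, rewritten by per_index, regroups into q·count + prefix count
theorem loopB (n L : Int) (hL : 0 < L) (l : List Char) : ∀ (k : Int), 0 ≤ k → k + l.length ≤ L →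
    (((PySem.List.enumerate l k).filter (fun ic => ic.2 == 'a')).map
      (fun ic => -(PySem.Int.floordiv (ic.1 - n) L))).sum
    = (l.count 'a' : Int) * PySem.Int.floordiv n L
      + ((l.take (PySem.Int.mod n L - k).toNat).count 'a' : Int) := by
  induction l with
  | nil => intro k _ _; simp [PySem.List.enumerate_nil]
  | cons h t ih =>
      intro k hk hlen
      have hr0 := PySem.Int.mod_nonneg n hL
      rw [PySem.List.enumerate_cons]
      by_cases hc : h = 'a'
      · subst hc
        simp only [List.filter_cons, beq_self_eq_true, if_pos, List.map_cons, List.sum_cons]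
        rw [ih (k + 1) (by omega) (by simp at hlen ⊢; omega)]
        rw [per_index n L k hL hk (by simp at hlen; omega)]
        by_cases hr : k < PySem.Int.mod n L
        · have htake : (PySem.Int.mod n L - k).toNat = ((PySem.Int.mod n L - (k + 1)).toNat) + 1 := by omega
          rw [if_pos hr]
          simp [htake, List.count_cons]
          push_cast; ring
        · have h0 : (PySem.Int.mod n L - k).toNat = 0 := by omega
          have h1 : (PySem.Int.mod n L - (k + 1)).toNat = 0 := by omega
          rw [if_neg hr]
          simp [h0, h1, List.count_cons]
          push_cast; ring
      · have hcb : (h == 'a') = false := by simpa using hc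
        simp only [List.filter_cons, hcb, Bool.false_eq_true, if_false]
        rw [ih (k + 1) (by omega) (by simp at hlen ⊢; omega)]
        by_cases hr : k < PySem.Int.mod n L
        · have htake : (PySem.Int.mod n L - k).toNat = ((PySem.Int.mod n L - (k + 1)).toNat) + 1 := by omega
          simp [htake, List.count_cons, hc]
        · have h0 : (PySem.Int.mod n L - k).toNat = 0 := by omega
          have h1 : (PySem.Int.mod n L - (k + 1)).toNat = 0 := by omega
          simp [h0, h1, List.count_cons, hc]

-- ===== VERDICT (by name: the statement is the Claim_ definition above) =====
theorem repeatedString2_spec : Claim_equal_repeatedString2 := by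
  intro s n _ hpre
  unfold Spec_repeatedString2 repeatedString2 repeatedString2_alt
  have hnil : s.toList ≠ [] := hpre
  have hlen : 0 < (PySem.Str.len s) := by
    simp only [PySem.Str.len_eq]
    have : s.toList.length ≠ 0 := fun h => hnil (List.length_eq_zero_iff.mp h)
    omega
  simp only
  rw [loopA _ _ 0 0 0 le_rfl,
      loopB n (PySem.Str.len s) hlen s.toList 0 le_rfl
        (by simp [PySem.Str.len_eq] at hlen ⊢)]
  simp [mul_comm]
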